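-- pv_equiv track=rewrite | github.com/yz4004/codeforce-python | daily/problem_list/2025/1015.py | solve
-- ===== SOURCE A (Python) =====
-- from math import inf, gcd, comb
--
-- mx = lambda x, y: x if x > y else y
--
-- mn = lambda x, y: y if x > y else x
--
-- def solve(n, nums):
--
--     # a0 - a1 + a2 ...
--     # even index -- min  p
--     # odd index -- max   q
--     # p-q -> q-p
--     # d = 2q - 2p  + |i-j|  maximize
--
--     # d = 2q - 2p + i - j
--
--     # i - odd
--     # nums[i] = q
--     # 2q + i - (2p + j) -- previous p (even index) -- min 2p+j
--
--     # i - even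
--     # nums[i] = p
--     # -2p+i + (2q-j)  -- previous q (odd index) -- max 2q-j
--
--     d = 0
--     if n > 2:
--         # 0123  - 2-0
--         # 01234 - 4-0
--         d = (n-1) - (n-1)%2
--
--     a = inf   # min 2*p+j
--     b = -inf  # max 2*q-j
--
--     for i in range(n):
--         if i % 2 == 1:
--             q = nums[i]
--             t = 2*q + i
--             if t - a > d:
--                 d = t - a
--
--             b = mx(b, 2*q-i)
--         else:
--             p = nums[i]
--             t = i - 2*p
--             if t + b > d:
--                 d = t + b
--
--             a = mn(a, 2*p+i)
--
--     return sum(nums[0:n:2]) - sum(nums[1:n:2]) + d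
-- ===== SOURCE B (Python) =====
-- def solve(n, nums):
--     base = sum(nums[0:n:2]) - sum(nums[1:n:2])
--     d = (n - 1) - (n - 1) % 2 if n > 2 else 0
--     for i in range(n):
--         for j in range(i):
--             if (i - j) % 2 == 1:
--                 if i % 2 == 1:
--                     q, p = nums[i], nums[j]
--                 else:
--                     q, p = nums[j], nums[i]
--                 c = 2 * q - 2 * p + (i - j)
--                 if c > d:
--                     d = c
--     return base + d
-- ===== Notes on version B (the rewrite author's own statement) =====
-- stated objective: alternative
-- what changed: Replaces A's single incremental pass with running min/max accumulators (min of 2*p+j over even indices, max of 2*q-j over odd indices) by an exhaustive double loop that directly maximizes the candidate 2*q - 2*p + (i - j) over all opposite-parity index pairs j < i; A is O(n), B is O(n^2).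
import Mathlib
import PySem

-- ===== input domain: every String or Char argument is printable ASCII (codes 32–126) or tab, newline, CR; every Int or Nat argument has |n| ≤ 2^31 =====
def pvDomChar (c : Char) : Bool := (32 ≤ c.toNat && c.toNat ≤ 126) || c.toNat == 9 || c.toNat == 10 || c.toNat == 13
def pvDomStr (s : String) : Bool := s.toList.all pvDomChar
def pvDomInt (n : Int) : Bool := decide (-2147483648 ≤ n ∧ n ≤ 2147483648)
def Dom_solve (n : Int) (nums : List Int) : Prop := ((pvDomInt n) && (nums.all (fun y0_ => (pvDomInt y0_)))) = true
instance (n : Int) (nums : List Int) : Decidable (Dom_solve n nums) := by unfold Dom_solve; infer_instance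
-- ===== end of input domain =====

-- B replaces A's single pass with running min/max accumulators by an exhaustive double loop
-- over all opposite-parity index pairs j < i (objective: simpler/alternative, not faster).

-- ===== PORT A =====
-- nums[i]; Pre_solve guarantees the index is in range, so the default is never reached inside Pre_
def pvGet (nums : List Int) (i : Int) : Int := (PySem.List.pyGet? nums i).getD 0

-- the body of A's for-loop; state = (d, a, b), a = math.inf and b = -math.inf modelled as `none`
-- (exact: with a = inf the test `t - a > d` is always false and mn(inf, v) = v; dually for b)
def stepA (nums : List Int) (st : Int × Option Int × Option Int) (i : Int) :
    Int × Option Int × Option Int :=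
  if PySem.Int.mod i 2 == 1 then
    let q := pvGet nums i
    let t := 2 * q + i
    let d := match st.2.1 with
      | none => st.1
      | some av => if t - av > st.1 then t - av else st.1
    let b := match st.2.2 with
      | none => some (2 * q - i)
      | some bv => some (if bv > 2 * q - i then bv else 2 * q - i)   -- mx
    (d, st.2.1, b)
  else
    let p := pvGet nums i
    let t := i - 2 * p
    let d := match st.2.2 with
      | none => st.1
      | some bv => if t + bv > st.1 then t + bv else st.1
    let a := match st.2.1 with
      | none => some (2 * p + i)
      | some av => some (if av > 2 * p + i then 2 * p + i else av)   -- mn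
    (d, a, st.2.2)

def solve (n : Int) (nums : List Int) : Int :=
  let d0 : Int := if n > 2 then (n - 1) - PySem.Int.mod (n - 1) 2 else 0
  let st := (PySem.List.pyRange 0 n 1).foldl (stepA nums) (d0, none, none)
  ((PySem.List.slice? nums (some 0) (some n) 2).getD []).sum
    - ((PySem.List.slice? nums (some 1) (some n) 2).getD []).sum + st.1

-- ===== PORT B =====
-- body of B's inner loop: candidate for the pair (i, j), q the odd-indexed, p the even-indexed element
def innerB (nums : List Int) (i : Int) (d : Int) (j : Int) : Int :=
  if PySem.Int.mod (i - j) 2 == 1 then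
    let qp := if PySem.Int.mod i 2 == 1 then (pvGet nums i, pvGet nums j)
              else (pvGet nums j, pvGet nums i)
    let c := 2 * qp.1 - 2 * qp.2 + (i - j)
    if c > d then c else d
  else d

def stepB (nums : List Int) (d : Int) (i : Int) : Int :=
  (PySem.List.pyRange 0 i 1).foldl (innerB nums i) d

def solve_alt (n : Int) (nums : List Int) : Int :=
  let base := ((PySem.List.slice? nums (some 0) (some n) 2).getD []).sum
    - ((PySem.List.slice? nums (some 1) (some n) 2).getD []).sum
  let d0 : Int := if n > 2 then (n - 1) - PySem.Int.mod (n - 1) 2 else 0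
  let d := (PySem.List.pyRange 0 n 1).foldl (stepB nums) d0
  base + d

-- ===== PRECONDITION & SPEC =====
-- A indexes nums[i] for every i in range(n): it raises IndexError exactly when n > len(nums)
def Pre_solve (n : Int) (nums : List Int) : Prop := n ≤ nums.length
instance (n : Int) (nums : List Int) : Decidable (Pre_solve n nums) := by unfold Pre_solve; infer_instance

def pvWitness_solve : Int × List Int := (4, [3, -1, 4, 1])

def Spec_solve (n : Int) (nums : List Int) (out : Int) : Prop := out = solve_alt n nums
instance (n : Int) (nums : List Int) (out : Int) : Decidable (Spec_solve n nums out) := by unfold Spec_solve; infer_instance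

-- ===== CLAIM (what is proved, stated in full; the proofs are below) =====
def Claim_equal_solve : Prop := ∀ (n : Int) (nums : List Int), Dom_solve n nums → Pre_solve n nums → Spec_solve n nums (solve n nums)

-- ===== LEMMAS AND PROOFS =====

-- [0, 1, ..., k-1] as a list of Ints
def rangeI (k : Nat) : List Int := (List.range k).map (fun j => (j : Int))

def gI (nums : List Int) (k : Nat) : Int := pvGet nums (k : Int)

-- A's accumulator a after processing indices 0..k-1 (running min over even j < k of 2*nums[j]+j)
def aSt (nums : List Int) : Nat → Option Int
  | 0 => none
  | k + 1 =>
    if k % 2 = 1 then aSt nums k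
    else some (match aSt nums k with
      | none => 2 * gI nums k + k
      | some av => if av > 2 * gI nums k + k then 2 * gI nums k + k else av)

-- A's accumulator b after processing indices 0..k-1 (running max over odd j < k of 2*nums[j]-j)
def bSt (nums : List Int) : Nat → Option Int
  | 0 => none
  | k + 1 =>
    if k % 2 = 1 then
      some (match bSt nums k with
        | none => 2 * gI nums k - k
        | some bv => if bv > 2 * gI nums k - k then bv else 2 * gI nums k - k)
    else bSt nums k

lemma rangeI_succ (k : Nat) : rangeI (k + 1) = rangeI k ++ [(k : Int)] := by
  simp [rangeI, List.range_succ]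

lemma pyRange_eq_rangeI (n : Int) : PySem.List.pyRange 0 n 1 = rangeI n.toNat := by
  rw [PySem.List.pyRange_one, rangeI]
  simp
  exact List.map_eq_flatMap

-- B's inner loop over j < m computes the same "best candidate so far" that A reads off its accumulator
lemma innerB_spec (nums : List Int) (i : Nat) : ∀ m : Nat, m ≤ i → ∀ d : Int,
    (rangeI m).foldl (innerB nums (i : Int)) d =
      if i % 2 = 1 then
        (match aSt nums m with
          | none => d
          | some av => max d (2 * gI nums i + i - av))
      else
        (match bSt nums m with
          | none => d
          | some bv => max d (i - 2 * gI nums i + bv)) := by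
  intro m
  induction m with
  | zero =>
    intro _ d
    by_cases h : i % 2 = 1 <;> simp [rangeI, aSt, bSt, h]
  | succ k ih =>
    intro hk d
    have hki : k ≤ i := by omega
    rw [rangeI_succ, List.foldl_append, ih hki d]
    simp only [List.foldl_cons, List.foldl_nil]
    have hsub : (i : Int) - (k : Int) = ((i - k : Nat) : Int) := by omega
    have hmodik : PySem.Int.mod ((i : Int) - (k : Int)) 2 = (((i - k) % 2 : Nat) : Int) := by
      rw [hsub]; exact_mod_cast PySem.Int.mod_natCast (i - k) 2
    have hmodi : PySem.Int.mod (i : Int) 2 = ((i % 2 : Nat) : Int) := PySem.Int.mod_natCast i 2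
    by_cases hi : i % 2 = 1
    · simp only [if_pos hi]
      by_cases hkpar : k % 2 = 1
      · -- same parity: the inner body skips, and aSt is unchanged
        have hik : (i - k) % 2 = 0 := by omega
        have hcf : (PySem.Int.mod ((i : Int) - (k : Int)) 2 == 1) = false := by
          rw [hmodik, hik]; decide
        rw [innerB, if_neg (by rw [hcf]; exact Bool.false_ne_true), aSt, if_pos hkpar]
      · -- k even, i odd: candidate (2*gI i + i) - (2*gI k + k)
        have hik : (i - k) % 2 = 1 := by omega
        have hct : (PySem.Int.mod ((i : Int) - (k : Int)) 2 == 1) = true := by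
          rw [hmodik, hik]; decide
        have hcti : (PySem.Int.mod (i : Int) 2 == 1) = true := by
          rw [hmodi, hi]; decide
        simp only [innerB, hct, hcti, if_true]
        rw [aSt, if_neg hkpar]
        cases haSt : aSt nums k with
        | none => simp only [gI, max_def]; split_ifs <;> linarith
        | some av => simp only [gI, max_def]; split_ifs <;> linarith
    · simp only [if_neg hi]
      have hi0 : i % 2 = 0 := by omega
      by_cases hkpar : k % 2 = 1
      · -- k odd, i even: candidate (i - 2*gI i) + (2*gI k - k)
        have hik : (i - k) % 2 = 1 := by omega
        have hct : (PySem.Int.mod ((i : Int) - (k : Int)) 2 == 1) = true := by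
          rw [hmodik, hik]; decide
        have hcfi : (PySem.Int.mod (i : Int) 2 == 1) = false := by
          rw [hmodi, hi0]; decide
        simp only [innerB, hct, hcfi, Bool.false_eq_true, if_true, if_false]
        rw [bSt, if_pos hkpar]
        cases hbSt : bSt nums k with
        | none => simp only [gI, max_def]; split_ifs <;> linarith
        | some bv => simp only [gI, max_def]; split_ifs <;> linarith
      · -- both even: skip
        have hik : (i - k) % 2 = 0 := by omega
        have hcf : (PySem.Int.mod ((i : Int) - (k : Int)) 2 == 1) = false := by
          rw [hmodik, hik]; decide
        rw [innerB, if_neg (by rw [hcf]; exact Bool.false_ne_true), bSt, if_neg hkpar]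

-- main loop invariant: A's state after k steps is (B's d after k outer steps, aSt k, bSt k)
lemma loop_eq (nums : List Int) (d0 : Int) : ∀ k : Nat,
    (rangeI k).foldl (stepA nums) (d0, none, none) =
      ((rangeI k).foldl (stepB nums) d0, aSt nums k, bSt nums k) := by
  intro k
  induction k with
  | zero => simp [rangeI, aSt, bSt]
  | succ k ih =>
    rw [rangeI_succ, List.foldl_append, List.foldl_append, ih]
    simp only [List.foldl_cons, List.foldl_nil]
    have hmodk : PySem.Int.mod (k : Int) 2 = ((k % 2 : Nat) : Int) := PySem.Int.mod_natCast k 2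
    have hstepB : stepB nums ((rangeI k).foldl (stepB nums) d0) (k : Int)
        = (rangeI k).foldl (innerB nums (k : Int)) ((rangeI k).foldl (stepB nums) d0) := by
      rw [stepB, pyRange_eq_rangeI, Int.toNat_natCast]
    set dB := (rangeI k).foldl (stepB nums) d0 with hdB
    rw [hstepB, innerB_spec nums k k (le_refl k) dB]
    by_cases hk : k % 2 = 1
    · have hct : (PySem.Int.mod (k : Int) 2 == 1) = true := by rw [hmodk, hk]; decide
      rw [stepA, if_pos hct, if_pos hk]
      refine congrArg₂ _ ?_ (congrArg₂ _ ?_ ?_)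
      · cases haSt : aSt nums k with
        | none => simp
        | some av => simp only [gI, max_def]; split_ifs <;> linarith
      · exact (by rw [aSt, if_pos hk] : aSt nums (k+1) = aSt nums k).symm
      · rw [bSt, if_pos hk]
        cases hb : bSt nums k <;> rfl
    · have hk0 : k % 2 = 0 := by omega
      have hcf : (PySem.Int.mod (k : Int) 2 == 1) = false := by rw [hmodk, hk0]; decide
      rw [stepA, if_neg (by rw [hcf]; exact Bool.false_ne_true), if_neg hk]
      refine congrArg₂ _ ?_ (congrArg₂ _ ?_ ?_)
      · cases hbSt : bSt nums k with
        | none => simp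
        | some bv => simp only [gI, max_def]; split_ifs <;> linarith
      · rw [aSt, if_neg hk]
        cases ha : aSt nums k <;> rfl
      · exact (by rw [bSt, if_neg hk] : bSt nums (k+1) = bSt nums k).symm

-- ===== VERDICT (by name: the statement is the Claim_ definition above) =====
theorem solve_spec : Claim_equal_solve := by
  intro n nums _ _
  unfold Spec_solve solve solve_alt
  simp only [pyRange_eq_rangeI, loop_eq]
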